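-- pv_equiv track=rewrite | github.com/Luis-omega/Bin | dumb_formatter.py | format_code_iterator
-- ===== SOURCE A (Python) =====
-- def indent_str(level: int, indent_size: int) -> str:
--     return " " * (level * indent_size)
--
-- def format_code_iterator(code: str, indent_size: int = 2):
--     indent_level = 0
--     previous_char = None
--
--     for char in code:
--         if char == " " and previous_char == " ":  # Reducir múltiples espacios a uno
--             continue
--         if char in "{[(":
--             yield f"\n{indent_str(indent_level, indent_size)}{char}\n"
--             indent_level += 1
--             yield indent_str(indent_level, indent_size)
--         elif char in "}])":
--             yield "\n"
--             indent_level -= 1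
--             yield f"{indent_str(indent_level, indent_size)}{char}"
--         elif char == ",":
--             yield f"\n{indent_str(indent_level, indent_size)}{char}"
--         elif char != "\n":  # Ignorar saltos de línea adicionales
--             yield char
--         previous_char = char
-- ===== SOURCE B (Python) =====
-- def format_code_iterator(code: str, indent_size: int = 2):
--     # pass 1: collapse every run of spaces to a single space
--     squashed = []
--     for c in code:
--         if c == " " and squashed and squashed[-1] == " ":
--             continue
--         squashed.append(c)
--     # pass 2: prefix-scan the indentation level in effect before each char
--     levels = []
--     level = 0
--     for c in squashed:
--         levels.append(level)
--         if c in "{[(":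
--             level += 1
--         elif c in "}])":
--             level -= 1
--     # pass 3: each (char, level) maps independently to its output pieces
--     def ind(l):
--         return " " * (l * indent_size)
--
--     def pieces(c, l):
--         if c in "{[(":
--             return ["\n" + ind(l) + c + "\n", ind(l + 1)]
--         if c in "}])":
--             return ["\n", ind(l - 1) + c]
--         if c == ",":
--             return ["\n" + ind(l) + c]
--         if c != "\n":
--             return [c]
--         return []
--
--     for c, l in zip(squashed, levels):
--         yield from pieces(c, l)
-- ===== Notes on version B (the rewrite author's own statement) =====
-- stated objective: alternative
-- what changed: A's single stateful generator pass (tracking previous_char and a mutable indent level) is replaced by three independent passes: collapse space runs, prefix-scan the indentation level per character, then map each (char, level) pair independently to its output pieces.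
import Mathlib
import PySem

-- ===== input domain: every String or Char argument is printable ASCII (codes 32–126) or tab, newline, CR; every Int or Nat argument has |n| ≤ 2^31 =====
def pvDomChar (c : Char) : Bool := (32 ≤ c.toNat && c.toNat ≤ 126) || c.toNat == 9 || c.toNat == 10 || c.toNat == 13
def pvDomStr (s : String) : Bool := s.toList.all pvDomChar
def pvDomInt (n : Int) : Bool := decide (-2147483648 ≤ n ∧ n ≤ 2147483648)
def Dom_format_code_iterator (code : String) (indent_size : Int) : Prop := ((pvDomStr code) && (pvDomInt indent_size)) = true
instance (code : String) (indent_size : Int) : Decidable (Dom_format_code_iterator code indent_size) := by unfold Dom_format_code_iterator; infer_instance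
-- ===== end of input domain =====

-- B replaces A's single stateful pass (previous_char + mutable indent level) by three
-- independent passes: squash space runs, prefix-scan the levels, then map each
-- (char, level) pair to its pieces; objective: alternative decomposition, same cost.
-- A is a generator; equivalence is about the list of yielded strings.

-- ===== PORT A =====
-- " " * (level * indent_size)  (negative repeat count gives "")
def indent_str (level : Int) (indent_size : Int) : String :=
  String.ofList (List.replicate (level * indent_size).toNat ' ')

-- one iteration of A's for-loop; state = (indent_level, previous_char, yielded so far)
def fciStepA (indent_size : Int) (st : Int × Option Char × List String) (c : Char) :
    Int × Option Char × List String :=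
  let lvl := st.1
  let acc := st.2.2
  if c = ' ' ∧ st.2.1 = some ' ' then st   -- continue (previous_char not updated)
  else if c = '{' ∨ c = '[' ∨ c = '(' then   -- char in "{[("
    (lvl + 1, some c,
      acc ++ ["\n" ++ indent_str lvl indent_size ++ String.singleton c ++ "\n",
              indent_str (lvl + 1) indent_size])
  else if c = '}' ∨ c = ']' ∨ c = ')' then   -- char in "}])"
    (lvl - 1, some c, acc ++ ["\n", indent_str (lvl - 1) indent_size ++ String.singleton c])
  else if c = ',' then
    (lvl, some c, acc ++ ["\n" ++ indent_str lvl indent_size ++ String.singleton c])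
  else if c ≠ '\n' then
    (lvl, some c, acc ++ [String.singleton c])
  else (lvl, some c, acc)

def format_code_iterator (code : String) (indent_size : Int) : List String :=
  (code.toList.foldl (fciStepA indent_size) (0, none, [])).2.2

-- ===== PORT B =====
-- pass 1: collapse runs of spaces (skip c when the last kept char is a space)
def fciSquashB (code : List Char) : List Char :=
  code.foldl (fun acc c => if c = ' ' ∧ acc.getLast? = some ' ' then acc else acc ++ [c]) []

-- pass 2: level in effect before each char
def fciLevelsB (s : List Char) : List Int :=
  (s.foldl (fun (st : Int × List Int) c =>
      let ls := st.2 ++ [st.1]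
      if c = '{' ∨ c = '[' ∨ c = '(' then (st.1 + 1, ls)
      else if c = '}' ∨ c = ']' ∨ c = ')' then (st.1 - 1, ls)
      else (st.1, ls)) (0, [])).2

-- pass 3: the pieces one (char, level) pair contributes
def fciPiecesB (indent_size : Int) (c : Char) (l : Int) : List String :=
  if c = '{' ∨ c = '[' ∨ c = '(' then
    ["\n" ++ indent_str l indent_size ++ String.singleton c ++ "\n",
     indent_str (l + 1) indent_size]
  else if c = '}' ∨ c = ']' ∨ c = ')' then
    ["\n", indent_str (l - 1) indent_size ++ String.singleton c]
  else if c = ',' then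
    ["\n" ++ indent_str l indent_size ++ String.singleton c]
  else if c ≠ '\n' then [String.singleton c]
  else []

def format_code_iterator_alt (code : String) (indent_size : Int) : List String :=
  let s := fciSquashB code.toList
  (s.zip (fciLevelsB s)).foldl (fun acc p => acc ++ fciPiecesB indent_size p.1 p.2) []

-- ===== PRECONDITION & SPEC =====
def Spec_format_code_iterator (code : String) (indent_size : Int) (out : List String) : Prop := out = format_code_iterator_alt code indent_size
instance (code : String) (indent_size : Int) (out : List String) : Decidable (Spec_format_code_iterator code indent_size out) := by unfold Spec_format_code_iterator; infer_instance

-- ===== CLAIM (what is proved, stated in full; the proofs are below) =====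
def Claim_equal_format_code_iterator : Prop := ∀ (code : String) (indent_size : Int), Dom_format_code_iterator code indent_size → Spec_format_code_iterator code indent_size (format_code_iterator code indent_size)

-- ===== LEMMAS AND PROOFS =====

-- the squashed remainder of l when the previously seen char is `prev`
def fciSquashRel (prev : Option Char) : List Char → List Char
  | [] => []
  | c :: t =>
      if c = ' ' ∧ prev = some ' ' then fciSquashRel prev t
      else c :: fciSquashRel (some c) t

-- B's squash fold computes fciSquashRel of the last kept char
theorem fciSquashB_fold (l : List Char) (acc : List Char) :
    l.foldl (fun acc c => if c = ' ' ∧ acc.getLast? = some ' ' then acc else acc ++ [c]) acc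
      = acc ++ fciSquashRel acc.getLast? l := by
  induction l generalizing acc with
  | nil => simp [fciSquashRel]
  | cons c t ih =>
      simp only [List.foldl_cons, fciSquashRel]
      by_cases h : c = ' ' ∧ acc.getLast? = some ' '
      · simp [h, ih]
      · simp [h, ih (acc ++ [c])]

-- emission without previous_char: A's loop restricted to the squashed stream
def fciEmit (indent_size : Int) : List Char → Int → List String → List String
  | [], _, acc => acc
  | c :: t, lvl, acc =>
      if c = '{' ∨ c = '[' ∨ c = '(' then
        fciEmit indent_size t (lvl + 1)
          (acc ++ ["\n" ++ indent_str lvl indent_size ++ String.singleton c ++ "\n",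
                   indent_str (lvl + 1) indent_size])
      else if c = '}' ∨ c = ']' ∨ c = ')' then
        fciEmit indent_size t (lvl - 1)
          (acc ++ ["\n", indent_str (lvl - 1) indent_size ++ String.singleton c])
      else if c = ',' then
        fciEmit indent_size t lvl
          (acc ++ ["\n" ++ indent_str lvl indent_size ++ String.singleton c])
      else if c ≠ '\n' then fciEmit indent_size t lvl (acc ++ [String.singleton c])
      else fciEmit indent_size t lvl acc

-- A's fold = emission over the squashed stream
theorem fciFoldA_eq_emit (isz : Int) (l : List Char) (lvl : Int) (prev : Option Char)
    (acc : List String) :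
    (l.foldl (fciStepA isz) (lvl, prev, acc)).2.2
      = fciEmit isz (fciSquashRel prev l) lvl acc := by
  induction l generalizing lvl prev acc with
  | nil => simp [fciSquashRel, fciEmit]
  | cons c t ih =>
      simp only [List.foldl_cons, fciSquashRel]
      by_cases h1 : c = ' ' ∧ prev = some ' '
      · simp [fciStepA, h1, ih]
      · by_cases h2 : c = '{' ∨ c = '[' ∨ c = '('
        · simp [fciStepA, h1, h2, fciEmit, ih]
        · by_cases h3 : c = '}' ∨ c = ']' ∨ c = ')'
          · simp [fciStepA, h1, h2, h3, fciEmit, ih]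
          · by_cases h4 : c = ','
            · simp [fciStepA, h4, fciEmit, ih]
            · by_cases h5 : c = '\n'
              · simp [fciStepA, h5, fciEmit, ih]
              · simp [fciStepA, h1, h2, h3, h4, h5, fciEmit, ih]

-- levels as a simple recursion with a starting level
def fciLevelsFrom (lvl : Int) : List Char → List Int
  | [] => []
  | c :: t =>
      lvl :: fciLevelsFrom
        (if c = '{' ∨ c = '[' ∨ c = '(' then lvl + 1
         else if c = '}' ∨ c = ']' ∨ c = ')' then lvl - 1 else lvl) t

theorem fciLevelsB_fold (l : List Char) (lvl : Int) (ls : List Int) :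
    (l.foldl (fun (st : Int × List Int) c =>
        let ls := st.2 ++ [st.1]
        if c = '{' ∨ c = '[' ∨ c = '(' then (st.1 + 1, ls)
        else if c = '}' ∨ c = ']' ∨ c = ')' then (st.1 - 1, ls)
        else (st.1, ls)) (lvl, ls)).2 = ls ++ fciLevelsFrom lvl l := by
  induction l generalizing lvl ls with
  | nil => simp [fciLevelsFrom]
  | cons c t ih =>
      simp only [List.foldl_cons, fciLevelsFrom]
      by_cases h2 : c = '{' ∨ c = '[' ∨ c = '('
      · simp [h2, ih]
      · by_cases h3 : c = '}' ∨ c = ']' ∨ c = ')'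
        · simp [h2, h3, ih]
        · simp [h2, h3, ih]

-- emission = fold of the per-pair pieces over the zipped stream
theorem fciEmit_eq_zip (isz : Int) (l : List Char) (lvl : Int) (acc : List String) :
    fciEmit isz l lvl acc
      = (l.zip (fciLevelsFrom lvl l)).foldl (fun acc p => acc ++ fciPiecesB isz p.1 p.2) acc := by
  induction l generalizing lvl acc with
  | nil => simp [fciEmit]
  | cons c t ih =>
      simp only [fciLevelsFrom, List.zip_cons_cons, List.foldl_cons]
      by_cases h2 : c = '{' ∨ c = '[' ∨ c = '('
      · simp [fciEmit, fciPiecesB, h2, ih]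
      · by_cases h3 : c = '}' ∨ c = ']' ∨ c = ')'
        · simp [fciEmit, fciPiecesB, h2, h3, ih]
        · by_cases h4 : c = ','
          · simp [fciEmit, fciPiecesB, h4, ih]
          · by_cases h5 : c = '\n'
            · simp [fciEmit, fciPiecesB, h5, ih]
            · simp [fciEmit, fciPiecesB, h2, h3, h4, h5, ih]

-- ===== VERDICT (by name: the statement is the Claim_ definition above) =====
theorem format_code_iterator_spec : Claim_equal_format_code_iterator := by
  intro code isz _
  have hs : fciSquashB code.toList = fciSquashRel none code.toList := by
    unfold fciSquashB; rw [fciSquashB_fold]; simp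
  have hl : ∀ s, fciLevelsB s = fciLevelsFrom 0 s := by
    intro s; unfold fciLevelsB; rw [fciLevelsB_fold]; simp
  unfold Spec_format_code_iterator format_code_iterator format_code_iterator_alt
  show _ = ((fciSquashB code.toList).zip (fciLevelsB (fciSquashB code.toList))).foldl
      (fun acc p => acc ++ fciPiecesB isz p.1 p.2) []
  rw [fciFoldA_eq_emit, hs, hl]
  exact fciEmit_eq_zip isz (fciSquashRel none code.toList) 0 []
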